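-- pv_equiv track=rewrite | github.com/Drip-Data/DataEva | finetune/convert_dataset.py | filter_by_metadata
-- ===== SOURCE A (Python) =====
-- from typing import List, Dict, Any, Optional
--
-- def filter_by_metadata(data: List[Dict],
--                       evaluation_types: Optional[List[str]] = None,
--                       model_names: Optional[List[str]] = None,
--                       task_ids: Optional[List[str]] = None) -> List[Dict]:
--     """Filter data based on metadata criteria"""
--     filtered_data = []
--
--     for entry in data:
--         metadata = entry.get('metadata', {})
--
--         # Filter by evaluation_type
--         if evaluation_types:
--             eval_type = metadata.get('evaluation_type', '')
--             if eval_type not in evaluation_types: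
--                 continue
--
--         # Filter by model_name
--         if model_names:
--             model_name = metadata.get('model_name', '')
--             if model_name not in model_names:
--                 continue
--
--         # Filter by task_id
--         if task_ids:
--             task_id = metadata.get('task_id', '')
--             if task_id not in task_ids:
--                 continue
--
--         filtered_data.append(entry)
--
--     return filtered_data
-- ===== SOURCE B (Python) =====
-- def filter_by_metadata(data,
--                        evaluation_types=None,
--                        model_names=None,
--                        task_ids=None):
--     """Filter data by metadata criteria in staged passes: each active
--     constraint is applied as its own whole-list filtering pass."""
--     result = list(data)
--     for key, values in (('evaluation_type', evaluation_types),
--                         ('model_name', model_names),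
--                         ('task_id', task_ids)):
--         if values:
--             result = [entry for entry in result
--                       if entry.get('metadata', {}).get(key, '') in values]
--     return result
-- ===== Notes on version B (the rewrite author's own statement) =====
-- stated objective: alternative
-- what changed: Replaces A's single accumulator loop with three unrolled if/continue tests per entry by staged passes: each active constraint is applied as its own whole-list filtering pass, composing up to three sequential filters.
import Mathlib
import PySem

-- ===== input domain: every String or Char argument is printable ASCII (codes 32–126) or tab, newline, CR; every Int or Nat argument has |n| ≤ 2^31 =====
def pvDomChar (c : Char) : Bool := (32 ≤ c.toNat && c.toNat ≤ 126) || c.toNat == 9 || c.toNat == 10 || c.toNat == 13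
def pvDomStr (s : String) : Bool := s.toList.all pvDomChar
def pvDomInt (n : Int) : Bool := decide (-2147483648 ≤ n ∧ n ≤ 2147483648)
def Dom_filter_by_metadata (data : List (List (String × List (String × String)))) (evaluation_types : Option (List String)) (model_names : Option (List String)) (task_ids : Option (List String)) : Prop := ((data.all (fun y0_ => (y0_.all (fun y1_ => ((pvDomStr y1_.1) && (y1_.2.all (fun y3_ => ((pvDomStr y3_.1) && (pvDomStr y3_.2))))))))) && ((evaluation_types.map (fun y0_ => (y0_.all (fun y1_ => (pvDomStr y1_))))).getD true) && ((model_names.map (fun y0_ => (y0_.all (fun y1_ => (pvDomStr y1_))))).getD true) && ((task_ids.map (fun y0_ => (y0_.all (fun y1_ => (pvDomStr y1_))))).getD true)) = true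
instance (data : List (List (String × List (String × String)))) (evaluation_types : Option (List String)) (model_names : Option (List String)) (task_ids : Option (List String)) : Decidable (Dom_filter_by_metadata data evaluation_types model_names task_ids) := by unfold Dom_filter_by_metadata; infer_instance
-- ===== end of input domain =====

-- B replaces A's single accumulator loop (three if/continue tests per entry) by staged passes:
-- each active constraint is applied as its own whole-list filtering pass (objective: alternative).

-- ===== PORT A =====
-- 'if evaluation_types:' — Python truthiness of Optional[List[str]]
def fbmTruthy (o : Option (List String)) : Bool :=
  match o with
  | none => false
  | some l => !l.isEmpty

def filter_by_metadata (data : List (List (String × List (String × String)))) (evaluation_types : Option (List String)) (model_names : Option (List String)) (task_ids : Option (List String)) : List (List (String × List (String × String))) :=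
  data.foldl (fun filtered_data entry =>
    let metadata := PySem.Dict.getD (PySem.Dict.mk entry) "metadata" []
    -- Filter by evaluation_type
    if fbmTruthy evaluation_types &&
       !((evaluation_types.getD []).contains (PySem.Dict.getD (PySem.Dict.mk metadata) "evaluation_type" "")) then
      filtered_data  -- continue
    -- Filter by model_name
    else if fbmTruthy model_names &&
       !((model_names.getD []).contains (PySem.Dict.getD (PySem.Dict.mk metadata) "model_name" "")) then
      filtered_data  -- continue
    -- Filter by task_id
    else if fbmTruthy task_ids &&
       !((task_ids.getD []).contains (PySem.Dict.getD (PySem.Dict.mk metadata) "task_id" "")) then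
      filtered_data  -- continue
    else
      filtered_data ++ [entry]) []

-- ===== PORT B =====
-- one staged pass: if the filter list is truthy, keep only entries whose metadata[key] (default '') is in it
def fbmStage (kv : String × Option (List String)) (result : List (List (String × List (String × String)))) : List (List (String × List (String × String))) :=
  match kv.2 with
  | none => result
  | some vs =>
    if vs.isEmpty then result
    else result.filter (fun entry =>
      vs.contains (PySem.Dict.getD (PySem.Dict.mk (PySem.Dict.getD (PySem.Dict.mk entry) "metadata" [])) kv.1 ""))

def filter_by_metadata_alt (data : List (List (String × List (String × String)))) (evaluation_types : Option (List String)) (model_names : Option (List String)) (task_ids : Option (List String)) : List (List (String × List (String × String))) :=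
  ([("evaluation_type", evaluation_types), ("model_name", model_names), ("task_id", task_ids)]
    : List (String × Option (List String))).foldl (fun result kv => fbmStage kv result) data

-- ===== PRECONDITION & SPEC =====
def Spec_filter_by_metadata (data : List (List (String × List (String × String)))) (evaluation_types : Option (List String)) (model_names : Option (List String)) (task_ids : Option (List String)) (out : List (List (String × List (String × String)))) : Prop := out = filter_by_metadata_alt data evaluation_types model_names task_ids
instance (data : List (List (String × List (String × String)))) (evaluation_types : Option (List String)) (model_names : Option (List String)) (task_ids : Option (List String)) (out : List (List (String × List (String × String)))) : Decidable (Spec_filter_by_metadata data evaluation_types model_names task_ids out) := by unfold Spec_filter_by_metadata; infer_instance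

-- ===== CLAIM (what is proved, stated in full; the proofs are below) =====
def Claim_equal_filter_by_metadata : Prop := ∀ (data : List (List (String × List (String × String)))) (evaluation_types : Option (List String)) (model_names : Option (List String)) (task_ids : Option (List String)), Dom_filter_by_metadata data evaluation_types model_names task_ids → Spec_filter_by_metadata data evaluation_types model_names task_ids (filter_by_metadata data evaluation_types model_names task_ids)

-- ===== LEMMAS AND PROOFS =====

theorem fbm_isEmpty_false (l : List String) (h : l ≠ []) : l.isEmpty = false := by simp [h]

-- A's accumulator loop is a single filter by the conjunction of the three tests
theorem fbm_foldl_eq (e m t : Option (List String))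
    (data : List (List (String × List (String × String))))
    (acc : List (List (String × List (String × String)))) :
    data.foldl (fun filtered_data entry =>
      let metadata := PySem.Dict.getD (PySem.Dict.mk entry) "metadata" []
      if fbmTruthy e && !((e.getD []).contains (PySem.Dict.getD (PySem.Dict.mk metadata) "evaluation_type" "")) then
        filtered_data
      else if fbmTruthy m && !((m.getD []).contains (PySem.Dict.getD (PySem.Dict.mk metadata) "model_name" "")) then
        filtered_data
      else if fbmTruthy t && !((t.getD []).contains (PySem.Dict.getD (PySem.Dict.mk metadata) "task_id" "")) then
        filtered_data
      else filtered_data ++ [entry]) acc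
    = acc ++ data.filter (fun entry =>
        let metadata := PySem.Dict.getD (PySem.Dict.mk entry) "metadata" []
        !(fbmTruthy e && !((e.getD []).contains (PySem.Dict.getD (PySem.Dict.mk metadata) "evaluation_type" ""))) &&
        !(fbmTruthy m && !((m.getD []).contains (PySem.Dict.getD (PySem.Dict.mk metadata) "model_name" ""))) &&
        !(fbmTruthy t && !((t.getD []).contains (PySem.Dict.getD (PySem.Dict.mk metadata) "task_id" "")))) := by
  induction data generalizing acc with
  | nil => simp
  | cons entry rest ih =>
    simp only [List.foldl_cons, List.filter_cons]
    rw [ih]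
    cases h1 : (fbmTruthy e && !((e.getD []).contains (PySem.Dict.getD (PySem.Dict.mk (PySem.Dict.getD (PySem.Dict.mk entry) "metadata" [])) "evaluation_type" ""))) <;>
    cases h2 : (fbmTruthy m && !((m.getD []).contains (PySem.Dict.getD (PySem.Dict.mk (PySem.Dict.getD (PySem.Dict.mk entry) "metadata" [])) "model_name" ""))) <;>
    cases h3 : (fbmTruthy t && !((t.getD []).contains (PySem.Dict.getD (PySem.Dict.mk (PySem.Dict.getD (PySem.Dict.mk entry) "metadata" [])) "task_id" ""))) <;>
    simp [h1, h2, h3]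

-- ===== VERDICT (by name: the statement is the Claim_ definition above) =====
theorem filter_by_metadata_spec : Claim_equal_filter_by_metadata := by
  intro data e m t _
  unfold Spec_filter_by_metadata filter_by_metadata filter_by_metadata_alt
  rw [fbm_foldl_eq e m t data []]
  simp only [List.foldl_cons, List.foldl_nil]
  rcases e with _ | el <;> rcases m with _ | ml <;> rcases t with _ | tl <;>
    simp only [fbmStage, fbmTruthy] <;>
    (try split_ifs) <;>
    simp_all [List.isEmpty_iff, fbm_isEmpty_false, List.filter_filter, Bool.and_comm, Bool.and_assoc]
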